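-- pv_equiv track=rewrite | github.com/dongzzi101/algorithm | 백준/Silver/4659. 비밀번호 발음하기/비밀번호 발음하기.py | three_in_a_row
-- ===== SOURCE A (Python) =====
-- def three_in_a_row(word):
-- 	const_count = 0
-- 	vowel_count = 0
--
-- 	for ch in word:
-- 		if ch == 'a' or ch == 'e' or ch == 'i' or ch == 'o' or ch == 'u':
-- 			vowel_count += 1
-- 			const_count = 0
--
-- 			if vowel_count == 3:
-- 				return False
--
-- 		else:
-- 			const_count += 1
-- 			vowel_count = 0
--
-- 			if const_count == 3:
-- 				return False
--
-- 	return True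
-- ===== SOURCE B (Python) =====
-- def three_in_a_row(word):
--     t = [c in 'aeiou' for c in word]
--     return not any(a == b == c for a, b, c in zip(t, t[1:], t[2:]))
-- ===== Notes on version B (the rewrite author's own statement) =====
-- stated objective: idiomatic
-- what changed: Replaces the two resetting vowel/consonant counters with a precomputed vowel-flag sequence and a sliding-window any() over zipped length-3 windows, returning False iff some window is all one type.
import Mathlib
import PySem

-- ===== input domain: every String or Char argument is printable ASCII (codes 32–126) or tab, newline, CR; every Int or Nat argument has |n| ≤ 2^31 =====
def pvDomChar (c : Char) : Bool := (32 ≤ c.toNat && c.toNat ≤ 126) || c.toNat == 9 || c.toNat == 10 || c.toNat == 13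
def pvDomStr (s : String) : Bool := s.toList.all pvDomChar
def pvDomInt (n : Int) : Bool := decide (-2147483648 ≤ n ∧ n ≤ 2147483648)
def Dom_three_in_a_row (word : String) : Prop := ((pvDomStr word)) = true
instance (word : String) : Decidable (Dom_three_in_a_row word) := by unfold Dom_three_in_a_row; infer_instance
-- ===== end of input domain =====

-- B replaces A's two resetting counters by a vowel-flag list scanned with a 3-wide sliding window (idiomatic zip/any form).

-- ===== PORT A =====
-- the for-loop with its two Int counters and the early `return False`
def threeLoopA : Int → Int → List Char → Bool
  | _, _, [] => true
  | const_count, vowel_count, ch :: rest =>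
    if ch == 'a' || ch == 'e' || ch == 'i' || ch == 'o' || ch == 'u' then
      if vowel_count + 1 == 3 then false
      else threeLoopA 0 (vowel_count + 1) rest
    else
      if const_count + 1 == 3 then false
      else threeLoopA (const_count + 1) 0 rest

def three_in_a_row (word : String) : Bool := threeLoopA 0 0 word.toList

-- ===== PORT B =====
-- Python `c in 'aeiou'`
def isVowelB (c : Char) : Bool := "aeiou".toList.contains c

-- `any(a == b == c for a, b, c in zip(t, t[1:], t[2:]))`; on a list, t[1:] / t[2:] are drop 1 / drop 2 (exact)
def win3 (t : List Bool) : Bool :=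
  (t.zip ((t.drop 1).zip (t.drop 2))).any (fun p => p.1 == p.2.1 && p.2.1 == p.2.2)

def three_in_a_row_alt (word : String) : Bool := !(win3 (word.toList.map isVowelB))

-- ===== PRECONDITION & SPEC =====
def Spec_three_in_a_row (word : String) (out : Bool) : Prop := out = three_in_a_row_alt word
instance (word : String) (out : Bool) : Decidable (Spec_three_in_a_row word out) := by unfold Spec_three_in_a_row; infer_instance

-- ===== CLAIM (what is proved, stated in full; the proofs are below) =====
def Claim_equal_three_in_a_row : Prop := ∀ (word : String), Dom_three_in_a_row word → Spec_three_in_a_row word (three_in_a_row word)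

-- ===== LEMMAS AND PROOFS =====

theorem cond_eq_isVowelB (ch : Char) :
    (ch == 'a' || ch == 'e' || ch == 'i' || ch == 'o' || ch == 'u') = isVowelB ch := by
  show _ = (['a','e','i','o','u'].contains ch)
  simp only [List.contains_cons, List.contains_nil, Bool.or_false, Bool.or_assoc]

theorem loopA_cons (cc vc : Int) (ch : Char) (rest : List Char) :
    threeLoopA cc vc (ch :: rest) =
      if isVowelB ch then
        (if vc + 1 == 3 then false else threeLoopA 0 (vc + 1) rest)
      else
        (if cc + 1 == 3 then false else threeLoopA (cc + 1) 0 rest) := by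
  rw [threeLoopA, cond_eq_isVowelB]

theorem w_cons3 (a b c : Bool) (l : List Bool) :
    win3 (a :: b :: c :: l) = ((a == b && b == c) || win3 (b :: c :: l)) := by
  simp [win3]

theorem win3_cons_ne (a b : Bool) (l : List Bool) (h : a ≠ b) :
    win3 (a :: b :: l) = win3 (b :: l) := by
  cases l with
  | nil => rfl
  | cons c l => rw [w_cons3]; simp [h]

theorem run_extend (k : Nat) (b : Bool) (xs : List Bool) :
    List.replicate k b ++ b :: xs = List.replicate (k + 1) b ++ xs := by
  rw [List.replicate_succ', List.append_assoc]; rfl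

theorem main_lemma (l : List Char) : ∀ (b : Bool) (k : Nat), k ≤ 2 →
    threeLoopA (cond b 0 (k : Int)) (cond b (k : Int) 0) l
      = !win3 (List.replicate k b ++ l.map isVowelB) := by
  induction l with
  | nil =>
    intro b k hk
    interval_cases k <;> cases b <;> simp [threeLoopA, win3]
  | cons ch rest ih =>
    intro b k hk
    rw [List.map_cons]
    by_cases hv : isVowelB ch = b
    · -- same type as the current run: the counter grows to k+1
      rw [hv, run_extend]
      by_cases h2 : k = 2
      · subst h2
        cases b <;>
          simp [loopA_cons, hv, List.replicate, w_cons3]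
      · have hk1 : k + 1 ≤ 2 := by omega
        have step := ih b (k + 1) hk1
        have hcast : (k : Int) + 1 = ((k + 1 : Nat) : Int) := by push_cast; ring
        have hne : (((k : Int) + 1) == 3) = false := by
          simp only [beq_eq_false_iff_ne, ne_eq]; omega
        cases b
        · simp only [Bool.cond_false] at step ⊢
          rw [loopA_cons, hv, if_neg Bool.false_ne_true, hne,
            if_neg Bool.false_ne_true, hcast]
          exact step
        · simp only [Bool.cond_true] at step ⊢
          rw [loopA_cons, hv, if_pos rfl, hne, if_neg Bool.false_ne_true, hcast]
          exact step
    · -- type switch: the new run has length 1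
      have hv' : isVowelB ch = !b := by cases b <;> simp_all
      rw [hv']
      have drop_run : win3 (List.replicate k b ++ (!b) :: rest.map isVowelB)
          = win3 ((!b) :: rest.map isVowelB) := by
        interval_cases k
        · rfl
        · simpa using win3_cons_ne b (!b) (rest.map isVowelB) (by simp)
        · have h1 : win3 (b :: b :: (!b) :: rest.map isVowelB)
              = win3 (b :: (!b) :: rest.map isVowelB) := by
            rw [w_cons3]; simp
          simpa [List.replicate] using
            h1.trans (win3_cons_ne b (!b) (rest.map isVowelB) (by simp))
      rw [drop_run]
      have step := ih (!b) 1 (by omega)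
      cases b
      · simpa [loopA_cons, hv', List.replicate] using step
      · simpa [loopA_cons, hv', List.replicate] using step

-- ===== VERDICT (by name: the statement is the Claim_ definition above) =====
theorem three_in_a_row_spec : Claim_equal_three_in_a_row := by
  intro word _
  unfold Spec_three_in_a_row three_in_a_row three_in_a_row_alt
  simpa using main_lemma word.toList true 0 (by omega)
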